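-- pv_equiv track=rewrite | github.com/camellia2077/FlipBits | tools/scripts/android/translate/core/android_string_text.py | _escape_android_string
-- ===== SOURCE A (Python) =====
-- def _escape_android_string(value: str) -> str:
--     if not value:
--         return value
--
--     escaped_chars: list[str] = []
--     for index, char in enumerate(value):
--         if char == "\\":
--             escaped_chars.append("\\\\")
--         elif char == "'":
--             escaped_chars.append("\\'")
--         elif char == '"':
--             escaped_chars.append('\\"')
--         elif index == 0 and char in ("@", "?"):
--             escaped_chars.append(f"\\{char}")
--         else:
--             escaped_chars.append(char)
--     return "".join(escaped_chars)
-- ===== SOURCE B (Python) =====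
-- def _escape_android_string(value: str) -> str:
--     if not value:
--         return value
--     escaped = value.replace("\\", "\\\\").replace("'", "\\'").replace('"', '\\"')
--     if value[0] in "@?":
--         return "\\" + escaped
--     return escaped
-- ===== Notes on version B (the rewrite author's own statement) =====
-- stated objective: alternative
-- what changed: Replaces A's single index-aware per-character branching loop with three staged whole-string replace passes (backslash, single quote, double quote) followed by a conditional leading backslash for a first @/?; correct because the escapes of the three chars contain no later needle and the @/? prefix commutes with the passes.
import Mathlib
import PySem

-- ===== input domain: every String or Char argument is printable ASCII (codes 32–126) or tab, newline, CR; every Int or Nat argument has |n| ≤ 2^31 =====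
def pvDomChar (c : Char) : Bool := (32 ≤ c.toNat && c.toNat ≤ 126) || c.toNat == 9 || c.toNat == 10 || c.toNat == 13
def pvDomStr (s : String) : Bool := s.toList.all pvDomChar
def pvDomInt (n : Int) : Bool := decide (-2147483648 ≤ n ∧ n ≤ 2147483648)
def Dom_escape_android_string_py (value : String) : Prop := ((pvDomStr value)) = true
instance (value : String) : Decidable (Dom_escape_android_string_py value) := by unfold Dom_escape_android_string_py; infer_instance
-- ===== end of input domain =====

-- B replaces A's index-aware per-character branching loop with three staged whole-string replace passes plus a conditional leading backslash (alternative decomposition).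

-- ===== PORT A =====
-- one iteration of A's loop: the escape emitted for character c at index i
def pvAEsc (i : Int) (c : Char) : List Char :=
  if c = '\\' then ['\\', '\\']
  else if c = '\'' then ['\\', '\'']
  else if c = '"' then ['\\', '"']
  else if i = 0 ∧ (c = '@' ∨ c = '?') then ['\\', c]
  else [c]

def escape_android_string_py (value : String) : String :=
  if value.toList = [] then value
  else
    String.ofList
      (((PySem.List.enumerate value.toList 0).foldl
          (fun acc p => acc ++ [pvAEsc p.1 p.2]) []).flatten)

-- ===== PORT B =====
-- str.replace of a single character old by the string new, over List Char (exact for 1-char needles)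
def pvRepl (old : Char) (new : List Char) (l : List Char) : List Char :=
  l.flatMap (fun c => if c = old then new else [c])

def escape_android_string_py_alt (value : String) : String :=
  match value.toList with
  | [] => value
  | c :: rest =>
    let escaped :=
      pvRepl '"' ['\\', '"']
        (pvRepl '\'' ['\\', '\'']
          (pvRepl '\\' ['\\', '\\'] (c :: rest)))
    if c = '@' ∨ c = '?' then String.ofList ('\\' :: escaped)
    else String.ofList escaped

-- ===== PRECONDITION & SPEC =====
def Spec_escape_android_string_py (value : String) (out : String) : Prop := out = escape_android_string_py_alt value
instance (value : String) (out : String) : Decidable (Spec_escape_android_string_py value out) := by unfold Spec_escape_android_string_py; infer_instance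

-- ===== CLAIM =====
def Claim_equal_escape_android_string_py : Prop := ∀ (value : String), Dom_escape_android_string_py value → Spec_escape_android_string_py value (escape_android_string_py value)

-- ===== LEMMAS AND PROOFS =====

-- the combined escape of a single character, as a table
def pvTrans (c : Char) : List Char :=
  if c = '\\' then ['\\', '\\']
  else if c = '\'' then ['\\', '\'']
  else if c = '"' then ['\\', '"']
  else [c]

-- at a nonzero index A's branch for @/? never fires, so A's per-char escape is the table
lemma pvAEsc_ne_zero (i : Int) (c : Char) (h : i ≠ 0) : pvAEsc i c = pvTrans c := by
  simp [pvAEsc, pvTrans, h]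

-- A's index-0 escape, split on the @/? condition
lemma pvAEsc_zero (c : Char) :
    pvAEsc 0 c = (if c = '@' ∨ c = '?' then ['\\', c] else pvTrans c) := by
  by_cases h : c = '@' ∨ c = '?'
  · rcases h with h | h <;> simp [pvAEsc, h]
  · simp [pvAEsc, pvTrans, h]

-- the tail of A's map over enumerate (all indices ≥ 1) is the plain table map
lemma pvEnum_map_tail (rest : List Char) (s : Int) (hs : 0 < s) :
    (PySem.List.enumerate rest s).map (fun p => pvAEsc p.1 p.2) = rest.map pvTrans := by
  induction rest generalizing s with
  | nil => simp [PySem.List.enumerate_nil]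
  | cons c rest ih =>
    rw [PySem.List.enumerate_cons]
    simp only [List.map_cons, pvAEsc_ne_zero s c (by omega)]
    rw [ih (s + 1) (by omega)]

-- the three staged replace passes compose to the single-pass table map
lemma pvRepl3_eq (l : List Char) :
    pvRepl '"' ['\\', '"'] (pvRepl '\'' ['\\', '\''] (pvRepl '\\' ['\\', '\\'] l))
      = (l.map pvTrans).flatten := by
  induction l with
  | nil => simp [pvRepl]
  | cons c l ih =>
    simp only [pvRepl, List.flatMap_cons, List.map_cons, List.flatten_cons] at *
    rw [← ih]
    by_cases h1 : c = '\\'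
    · subst h1; simp [pvTrans]
    · by_cases h2 : c = '\''
      · subst h2; simp [pvTrans]
      · by_cases h3 : c = '"'
        · subst h3; simp [pvTrans]
        · simp [pvTrans, h1, h2, h3]

-- ===== VERDICT =====
theorem escape_android_string_py_spec : Claim_equal_escape_android_string_py := by
  intro value _
  unfold Spec_escape_android_string_py escape_android_string_py escape_android_string_py_alt
  cases h : value.toList with
  | nil => simp
  | cons c rest =>
    simp only [reduceCtorEq, if_false]
    rw [PySem.List.foldl_append_singleton_eq_map, PySem.List.enumerate_cons]
    simp only [List.map_cons, List.flatten_cons, List.nil_append]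
    rw [pvEnum_map_tail rest (0 + 1) (by omega), pvAEsc_zero, pvRepl3_eq]
    by_cases hc : c = '@' ∨ c = '?'
    · have hcne : ¬(c = '\\') ∧ ¬(c = '\'') ∧ ¬(c = '"') := by
        rcases hc with h | h <;> subst h <;> exact ⟨by decide, by decide, by decide⟩
      simp [hc, pvTrans, hcne.1, hcne.2.1, hcne.2.2]
    · simp [hc]
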